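-- pv_equiv track=rewrite | github.com/lex-programmer/accounting | company_app-main/core/services/excel_parser.py | find_best_sheet
-- ===== SOURCE A (Python) =====
-- def find_best_sheet(sheet_names, target_year):
--     """Находит лучший лист с учетом года"""
--     sheet_priority = [
--         # Приоритет: листы с указанием года
--         lambda name: str(target_year) in name and any(word in name.lower() for word in ['buget', 'budget']),
--         lambda name: str(target_year) in name,
--         lambda name: any(word in name.lower() for word in ['buget', 'budget']) and any(
--             str(year) in name for year in range(2020, 2030)),
--         lambda name: any(word in name.lower() for word in ['buget', 'budget']),
--         lambda name: any(word in name.lower() for word in ['date', 'linii', 'indicatori']),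
--         lambda name: True  # Берем первый лист как запасной вариант
--     ]
--
--     for priority_func in sheet_priority:
--         for sheet_name in sheet_names:
--             if priority_func(sheet_name):
--                 return sheet_name
--
--     return sheet_names[0]  # Первый лист по умолчанию
-- ===== SOURCE B (Python) =====
-- def find_best_sheet(sheet_names, target_year):
--     """Находит лучший лист с учетом года"""
--     year_str = str(target_year)
--
--     def priority(name):
--         low = name.lower()
--         has_year = year_str in name
--         has_budget = 'buget' in low or 'budget' in low
--         if has_year and has_budget:
--             return 0
--         if has_year:
--             return 1
--         if has_budget and any(str(y) in name for y in range(2020, 2030)):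
--             return 2
--         if has_budget:
--             return 3
--         if any(word in low for word in ('date', 'linii', 'indicatori')):
--             return 4
--         return 5
--
--     return min(sheet_names, key=priority)
-- ===== Notes on version B (the rewrite author's own statement) =====
-- stated objective: faster
-- what changed: B scores each sheet once with a 0..5 priority function and selects the first minimum via min(key=...), replacing A's six successive full scans of the list (each repeating the substring tests) with one scoring pass that stops at the first satisfied condition per element.
import Mathlib
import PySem

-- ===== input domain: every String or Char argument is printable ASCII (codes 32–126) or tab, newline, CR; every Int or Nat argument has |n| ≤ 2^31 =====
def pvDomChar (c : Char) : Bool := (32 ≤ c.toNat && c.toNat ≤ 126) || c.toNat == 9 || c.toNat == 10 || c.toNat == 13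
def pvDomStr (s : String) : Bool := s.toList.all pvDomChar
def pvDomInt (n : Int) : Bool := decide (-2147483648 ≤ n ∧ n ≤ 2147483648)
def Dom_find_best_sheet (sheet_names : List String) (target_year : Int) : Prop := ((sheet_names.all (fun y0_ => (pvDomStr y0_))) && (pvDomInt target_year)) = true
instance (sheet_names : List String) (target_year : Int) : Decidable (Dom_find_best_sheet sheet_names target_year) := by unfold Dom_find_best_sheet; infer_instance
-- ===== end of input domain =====

-- B replaces A's six successive full scans by one 0..5 priority score per sheet and a single
-- first-minimum selection (Python min with key); same result on every non-empty sheet list.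


-- ===== PORT A =====
-- the six priority lambdas of A, in order
def predA0 (target_year : Int) (name : String) : Bool :=
  PySem.Str.isIn (PySem.Int.toStr target_year) name &&
    (["buget", "budget"].any (fun word => PySem.Str.isIn word (PySem.Str.lower name)))

def predA1 (target_year : Int) (name : String) : Bool :=
  PySem.Str.isIn (PySem.Int.toStr target_year) name

def predA2 (_target_year : Int) (name : String) : Bool :=
  (["buget", "budget"].any (fun word => PySem.Str.isIn word (PySem.Str.lower name))) &&
    ((PySem.List.pyRange 2020 2030 1).any (fun year => PySem.Str.isIn (PySem.Int.toStr year) name))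

def predA3 (_target_year : Int) (name : String) : Bool :=
  ["buget", "budget"].any (fun word => PySem.Str.isIn word (PySem.Str.lower name))

def predA4 (_target_year : Int) (name : String) : Bool :=
  ["date", "linii", "indicatori"].any (fun word => PySem.Str.isIn word (PySem.Str.lower name))

def predsA (target_year : Int) : List (String → Bool) :=
  [predA0 target_year, predA1 target_year, predA2 target_year,
   predA3 target_year, predA4 target_year, fun _ => true]

-- the outer 'for priority_func in sheet_priority' loop; the inner loop is List.find?
def loopA : List (String → Bool) → List String → Option String
  | [], _ => none
  | p :: ps, xs =>
    match xs.find? p with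
    | some s => some s
    | none => loopA ps xs

def find_best_sheet (sheet_names : List String) (target_year : Int) : String :=
  match loopA (predsA target_year) sheet_names with
  | some s => s
  | none => (PySem.List.pyGet? sheet_names 0).getD ""  -- sheet_names[0]; IndexError (empty list) excluded by Pre_

-- ===== PORT B =====
-- B's priority(name): index of the first condition the sheet name satisfies (0..5)
def prioB (target_year : Int) (name : String) : Nat :=
  let low := PySem.Str.lower name
  let has_year := PySem.Str.isIn (PySem.Int.toStr target_year) name
  let has_budget := PySem.Str.isIn "buget" low || PySem.Str.isIn "budget" low
  if has_year && has_budget then 0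
  else if has_year then 1
  else if has_budget && ((PySem.List.pyRange 2020 2030 1).any (fun y => PySem.Str.isIn (PySem.Int.toStr y) name)) then 2
  else if has_budget then 3
  else if ["date", "linii", "indicatori"].any (fun word => PySem.Str.isIn word low) then 4
  else 5

-- min(sheet_names, key=priority): fold keeping the first element of minimal priority
def find_best_sheet_alt (sheet_names : List String) (target_year : Int) : String :=
  match sheet_names with
  | [] => ""  -- Python min raises ValueError here; excluded by Pre_
  | h :: t => t.foldl (fun best x => if prioB target_year x < prioB target_year best then x else best) h

-- ===== PRECONDITION & SPEC =====
-- Pre_ excludes only the empty list, on which A raises IndexError (and B's min raises ValueError).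
def Pre_find_best_sheet (sheet_names : List String) (target_year : Int) : Prop :=
  sheet_names ≠ []
instance (sheet_names : List String) (target_year : Int) : Decidable (Pre_find_best_sheet sheet_names target_year) := by unfold Pre_find_best_sheet; infer_instance

def pvWitness_find_best_sheet : List String × Int := (["Sheet1", "Buget 2023"], 2023)

def Spec_find_best_sheet (sheet_names : List String) (target_year : Int) (out : String) : Prop := out = find_best_sheet_alt sheet_names target_year
instance (sheet_names : List String) (target_year : Int) (out : String) : Decidable (Spec_find_best_sheet sheet_names target_year out) := by unfold Spec_find_best_sheet; infer_instance

-- ===== CLAIM (what is proved, stated in full; the proofs are below) =====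
def Claim_equal_find_best_sheet : Prop := ∀ (sheet_names : List String) (target_year : Int), Dom_find_best_sheet sheet_names target_year → Pre_find_best_sheet sheet_names target_year → Spec_find_best_sheet sheet_names target_year (find_best_sheet sheet_names target_year)

-- ===== LEMMAS AND PROOFS =====

-- i-th predicate of A's priority list, as a function of the index
def predAt (target_year : Int) : Nat → String → Bool
  | 0 => predA0 target_year
  | 1 => predA1 target_year
  | 2 => predA2 target_year
  | 3 => predA3 target_year
  | 4 => predA4 target_year
  | _ => fun _ => true

theorem prio_le5 (ty : Int) (name : String) : prioB ty name ≤ 5 := by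
  unfold prioB; dsimp only; split_ifs <;> omega

-- B's priority is the index of the FIRST predicate of A that holds
theorem prio_hit (ty : Int) (name : String) : predAt ty (prioB ty name) name = true := by
  unfold prioB; dsimp only
  split_ifs with h1 h2 h3 h4 h5 <;>
    simp_all [predAt, predA0, predA1, predA2, predA3, predA4]

theorem predAt_le (ty : Int) (name : String) (i : Nat) (h : predAt ty i name = true) :
    prioB ty name ≤ i := by
  match i with
  | 0 => simp only [predAt, predA0] at h; unfold prioB; dsimp only; split_ifs <;> simp_all
  | 1 => simp only [predAt, predA1] at h; unfold prioB; dsimp only; split_ifs <;> simp_all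
  | 2 => simp only [predAt, predA2] at h; unfold prioB; dsimp only; split_ifs <;> simp_all
  | 3 => simp only [predAt, predA3] at h; unfold prioB; dsimp only; split_ifs <;> simp_all
  | 4 => simp only [predAt, predA4] at h; unfold prioB; dsimp only; split_ifs <;> simp_all
  | (n+5) => have := prio_le5 ty name; omega

theorem prio_first (ty : Int) (name : String) (i : Nat) (h : i < prioB ty name) :
    predAt ty i name = false := by
  cases hx : predAt ty i name
  · rfl
  · have := predAt_le ty name i hx; omega

-- the fold in B returns the first element of minimal priority: it splits the list
theorem gam_spec (ty : Int) (t : List String) (b : String) :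
    ∃ l1 l2, b :: t = l1 ++ (t.foldl (fun best x => if prioB ty x < prioB ty best then x else best) b) :: l2 ∧
      (∀ y ∈ l1, prioB ty (t.foldl (fun best x => if prioB ty x < prioB ty best then x else best) b) < prioB ty y) ∧
      (∀ x ∈ b :: t, prioB ty (t.foldl (fun best x => if prioB ty x < prioB ty best then x else best) b) ≤ prioB ty x) := by
  induction t generalizing b with
  | nil => exact ⟨[], [], rfl, by simp, by simp⟩
  | cons x t ih =>
    simp only [List.foldl_cons]
    by_cases hx : prioB ty x < prioB ty b
    · simp only [if_pos hx]
      obtain ⟨l1, l2, hsplit, hl1, hmin⟩ := ih x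
      refine ⟨b :: l1, l2, by simpa using congrArg (List.cons b) hsplit, ?_, ?_⟩
      · intro y hy
        rcases List.mem_cons.mp hy with rfl | hy
        · have hxm := hmin x (by simp); omega
        · exact hl1 y hy
      · intro z hz
        rcases List.mem_cons.mp hz with rfl | hz
        · have hxm := hmin x (by simp); omega
        · exact hmin z hz
    · simp only [if_neg hx]
      obtain ⟨l1, l2, hsplit, hl1, hmin⟩ := ih b
      cases l1 with
      | nil =>
        simp only [List.nil_append] at hsplit
        injection hsplit with h1 h2
        refine ⟨[], x :: t, by simpa using congrArg (fun s => s :: x :: t) h1, by simp, ?_⟩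
        intro z hz
        rcases List.mem_cons.mp hz with rfl | hz
        · exact hmin z (by simp)
        · rcases List.mem_cons.mp hz with rfl | hz
          · have hbm := hmin b (by simp); omega
          · exact hmin z (by simp [hz])
      | cons c l1' =>
        simp only [List.cons_append] at hsplit
        injection hsplit with hc ht
        have hcb : prioB ty (t.foldl (fun best x => if prioB ty x < prioB ty best then x else best) b) < prioB ty b := by
          have h2 := hl1 c (by simp)
          rw [← hc] at h2; exact h2
        refine ⟨b :: x :: l1', l2, by simpa using congrArg (fun l => b :: x :: l) ht, ?_, ?_⟩
        · intro y hy
          rcases List.mem_cons.mp hy with rfl | hy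
          · exact hcb
          · rcases List.mem_cons.mp hy with rfl | hy
            · omega
            · exact hl1 y (by simp [hy])
        · intro z hz
          rcases List.mem_cons.mp hz with rfl | hz
          · exact hmin z (by simp)
          · rcases List.mem_cons.mp hz with rfl | hz
            · omega
            · exact hmin z (by simp [hz])

theorem find?_first (p : String → Bool) (l1 : List String) (r : String) (l2 : List String)
    (h1 : ∀ y ∈ l1, p y = false) (h2 : p r = true) :
    (l1 ++ r :: l2).find? p = some r := by
  induction l1 with
  | nil => simp [h2]
  | cons a l ih =>
    simp only [List.cons_append, List.find?_cons, h1 a List.mem_cons_self]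
    exact ih (fun y hy => h1 y (by simp [hy]))

theorem findA_none (ty : Int) (xs : List String) (r : String) (i : Nat)
    (hmin : ∀ x ∈ xs, prioB ty r ≤ prioB ty x) (hi : i < prioB ty r) :
    xs.find? (predAt ty i) = none := by
  apply List.find?_eq_none.mpr
  intro x hx
  have := prio_first ty x i (by have := hmin x hx; omega)
  simp [this]

theorem findA_some (ty : Int) (l1 : List String) (r : String) (l2 : List String)
    (hl1 : ∀ y ∈ l1, prioB ty r < prioB ty y) :
    (l1 ++ r :: l2).find? (predAt ty (prioB ty r)) = some r := by
  apply find?_first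
  · intro y hy
    exact prio_first ty y (prioB ty r) (hl1 y hy)
  · exact prio_hit ty r

-- ===== VERDICT (by name: the statement is the Claim_ definition above) =====
theorem find_best_sheet_spec : Claim_equal_find_best_sheet := by
  intro xs ty _ hpre
  unfold Spec_find_best_sheet
  match xs with
  | [] => exact absurd rfl hpre
  | h :: t =>
    obtain ⟨l1, l2, hsplit, hl1, hmin⟩ := gam_spec ty t h
    set r := t.foldl (fun best x => if prioB ty x < prioB ty best then x else best) h with hr
    have hB : find_best_sheet_alt (h :: t) ty = r := rfl
    rw [hB]
    have h5 := prio_le5 ty r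
    have hsome0 := findA_some ty l1 r l2 hl1
    rw [← hsplit] at hsome0
    have hcases : prioB ty r = 0 ∨ prioB ty r = 1 ∨ prioB ty r = 2 ∨ prioB ty r = 3 ∨
        prioB ty r = 4 ∨ prioB ty r = 5 := by omega
    rcases hcases with hm | hm | hm | hm | hm | hm <;> rw [hm] at hsome0
    · have hs : (h :: t).find? (predA0 ty) = some r := hsome0
      simp [find_best_sheet, predsA, loopA, hs]
    · have hn0 : (h :: t).find? (predA0 ty) = none := findA_none ty (h :: t) r 0 hmin (by omega)
      have hs : (h :: t).find? (predA1 ty) = some r := hsome0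
      simp [find_best_sheet, predsA, loopA, hn0, hs]
    · have hn0 : (h :: t).find? (predA0 ty) = none := findA_none ty (h :: t) r 0 hmin (by omega)
      have hn1 : (h :: t).find? (predA1 ty) = none := findA_none ty (h :: t) r 1 hmin (by omega)
      have hs : (h :: t).find? (predA2 ty) = some r := hsome0
      simp [find_best_sheet, predsA, loopA, hn0, hn1, hs]
    · have hn0 : (h :: t).find? (predA0 ty) = none := findA_none ty (h :: t) r 0 hmin (by omega)
      have hn1 : (h :: t).find? (predA1 ty) = none := findA_none ty (h :: t) r 1 hmin (by omega)
      have hn2 : (h :: t).find? (predA2 ty) = none := findA_none ty (h :: t) r 2 hmin (by omega)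
      have hs : (h :: t).find? (predA3 ty) = some r := hsome0
      simp [find_best_sheet, predsA, loopA, hn0, hn1, hn2, hs]
    · have hn0 : (h :: t).find? (predA0 ty) = none := findA_none ty (h :: t) r 0 hmin (by omega)
      have hn1 : (h :: t).find? (predA1 ty) = none := findA_none ty (h :: t) r 1 hmin (by omega)
      have hn2 : (h :: t).find? (predA2 ty) = none := findA_none ty (h :: t) r 2 hmin (by omega)
      have hn3 : (h :: t).find? (predA3 ty) = none := findA_none ty (h :: t) r 3 hmin (by omega)
      have hs : (h :: t).find? (predA4 ty) = some r := hsome0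
      simp [find_best_sheet, predsA, loopA, hn0, hn1, hn2, hn3, hs]
    · have hn0 : (h :: t).find? (predA0 ty) = none := findA_none ty (h :: t) r 0 hmin (by omega)
      have hn1 : (h :: t).find? (predA1 ty) = none := findA_none ty (h :: t) r 1 hmin (by omega)
      have hn2 : (h :: t).find? (predA2 ty) = none := findA_none ty (h :: t) r 2 hmin (by omega)
      have hn3 : (h :: t).find? (predA3 ty) = none := findA_none ty (h :: t) r 3 hmin (by omega)
      have hn4 : (h :: t).find? (predA4 ty) = none := findA_none ty (h :: t) r 4 hmin (by omega)
      have hs : (h :: t).find? (fun _ => true) = some r := hsome0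
      simp [find_best_sheet, predsA, loopA, hn0, hn1, hn2, hn3, hn4, hs]
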